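-- pv_equiv track=rewrite | github.com/CleverJinn/PythonChallenges | ginortS/ginortS.py | ginortS
-- ===== SOURCE A (Python) =====
-- def ginortS(S):
--     Upperletters = []
--     Lowerletters = []
--
--     numbers = []
--     Even_num = []
--     Odd_num = []
--
--     ginort = ''
--
--     for x in S:
--         if x.isupper():
--             Upperletters.append(x)
--         elif x.islower():
--             Lowerletters.append(x)
--         elif x.isdigit():
--             numbers.append(x)
--
--     Lowerletters.sort()
--     Upperletters.sort()
--     numbers.sort()
--
--     for x in numbers:
--         if int(x) % 2 == 0:
--             Even_num.append(x)
--         else: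
--             Odd_num.append(x)
--
--     filter_list = Lowerletters + Upperletters + Odd_num + Even_num
--     for x in filter_list:
--         ginort += x
--
--
--
--     return ginort
-- ===== SOURCE B (Python) =====
-- def ginortS(S):
--     counts = {}
--     for c in S:
--         counts[c] = counts.get(c, 0) + 1
--     order = 'abcdefghijklmnopqrstuvwxyzABCDEFGHIJKLMNOPQRSTUVWXYZ1357902468'
--     out = []
--     for ch in order:
--         out.append(ch * counts.get(ch, 0))
--     return ''.join(out)
-- ===== Notes on version B (the rewrite author's own statement) =====
-- stated objective: faster
-- what changed: Replaces three list.sort() calls plus a parity-partition pass with a single counting pass over the input and one concatenation over the fixed 62-symbol output alphabet (counting sort).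
import Mathlib
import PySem

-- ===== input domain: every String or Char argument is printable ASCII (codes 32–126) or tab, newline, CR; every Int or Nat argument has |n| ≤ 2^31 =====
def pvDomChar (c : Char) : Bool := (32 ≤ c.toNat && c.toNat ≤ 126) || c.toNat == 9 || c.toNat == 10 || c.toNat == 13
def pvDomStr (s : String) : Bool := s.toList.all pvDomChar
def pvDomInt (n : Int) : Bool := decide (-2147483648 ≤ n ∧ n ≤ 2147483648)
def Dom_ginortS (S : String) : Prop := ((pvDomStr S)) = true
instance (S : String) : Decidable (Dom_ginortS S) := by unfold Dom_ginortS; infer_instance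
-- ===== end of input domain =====

-- B replaces A's three sorts and parity-partition pass with one counting pass and a
-- concatenation over the fixed 62-symbol output alphabet (counting sort); objective: faster.

-- ===== PORT A =====
def ginortS (S : String) : String :=
  -- the partition loop over S (the three lists, elif order preserved)
  let t := S.toList.foldl
    (fun (acc : List Char × List Char × List Char) x =>
      if PySem.Chars.isupper x then (acc.1 ++ [x], acc.2.1, acc.2.2)
      else if PySem.Chars.islower x then (acc.1, acc.2.1 ++ [x], acc.2.2)
      else if PySem.Chars.isdigit x then (acc.1, acc.2.1, acc.2.2 ++ [x])
      else acc)
    ([], [], [])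
  let lowers := PySem.List.sorted t.2.1 (fun c => c) false
  let uppers := PySem.List.sorted t.1 (fun c => c) false
  let nums := PySem.List.sorted t.2.2 (fun c => c) false
  -- the parity loop; int(x) on a digit char never raises, .getD 0 is unreachable
  let oe := nums.foldl
    (fun (acc : List Char × List Char) x =>
      if PySem.Int.mod ((PySem.Int.ofChars? [x]).getD 0) 2 == 0 then (acc.1 ++ [x], acc.2)
      else (acc.1, acc.2 ++ [x]))
    ([], [])
  let filterList := lowers ++ uppers ++ oe.2 ++ oe.1
  String.mk (filterList.foldl (fun g x => g ++ [x]) [])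

-- ===== PORT B =====
def ginortOrder : List Char :=
  "abcdefghijklmnopqrstuvwxyzABCDEFGHIJKLMNOPQRSTUVWXYZ1357902468".toList

def ginortS_alt (S : String) : String :=
  let counts := S.toList.foldl
    (fun (d : PySem.Dict Char Int) c => d.insert c (d.getD c 0 + 1)) PySem.Dict.empty
  String.mk ((ginortOrder.foldl
    (fun (out : List (List Char)) ch => out ++ [PySem.List.pyRepeat [ch] (counts.getD ch 0)])
    []).flatten)

-- ===== PRECONDITION & SPEC =====
def Spec_ginortS (S : String) (out : String) : Prop := out = ginortS_alt S
instance (S : String) (out : String) : Decidable (Spec_ginortS S out) := by unfold Spec_ginortS; infer_instance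

-- ===== CLAIM (what is proved, stated in full; the proofs are below) =====
def Claim_equal_ginortS : Prop := ∀ (S : String), Dom_ginortS S → Spec_ginortS S (ginortS S)

-- ===== LEMMAS AND PROOFS =====

-- the canonical counting-sort shape: each alphabet symbol repeated as often as it occurs in l
def pvBlocks (alph l : List Char) : List Char :=
  alph.flatMap (fun c => List.replicate (l.count c) c)

def pvLOW : List Char := "abcdefghijklmnopqrstuvwxyz".toList
def pvUPP : List Char := "ABCDEFGHIJKLMNOPQRSTUVWXYZ".toList
def pvDIG : List Char := "0123456789".toList
def pvODD : List Char := "13579".toList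
def pvEVE : List Char := "02468".toList

def pvPU (x : Char) : Bool := PySem.Chars.isupper x
def pvPL (x : Char) : Bool := !PySem.Chars.isupper x && PySem.Chars.islower x
def pvPD (x : Char) : Bool := !PySem.Chars.isupper x && !PySem.Chars.islower x && PySem.Chars.isdigit x
def pvPE (x : Char) : Bool := PySem.Int.mod ((PySem.Int.ofChars? [x]).getD 0) 2 == 0

theorem pv_foldA (l : List Char) (u lo n : List Char) :
    l.foldl (fun (acc : List Char × List Char × List Char) x =>
      if PySem.Chars.isupper x then (acc.1 ++ [x], acc.2.1, acc.2.2)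
      else if PySem.Chars.islower x then (acc.1, acc.2.1 ++ [x], acc.2.2)
      else if PySem.Chars.isdigit x then (acc.1, acc.2.1, acc.2.2 ++ [x])
      else acc) (u, lo, n)
    = (u ++ l.filter pvPU, lo ++ l.filter pvPL, n ++ l.filter pvPD) := by
  induction l generalizing u lo n with
  | nil => simp
  | cons x xs ih =>
    simp only [List.foldl_cons, List.filter_cons, pvPU, pvPL, pvPD]
    by_cases h1 : PySem.Chars.isupper x = true <;>
      by_cases h2 : PySem.Chars.islower x = true <;>
      by_cases h3 : PySem.Chars.isdigit x = true <;>
      simp [h1, h2, h3, ih]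

theorem pv_foldEO (l : List Char) (e o : List Char) :
    l.foldl (fun (acc : List Char × List Char) x =>
      if PySem.Int.mod ((PySem.Int.ofChars? [x]).getD 0) 2 == 0 then (acc.1 ++ [x], acc.2)
      else (acc.1, acc.2 ++ [x])) (e, o)
    = (e ++ l.filter pvPE, o ++ l.filter (fun x => !pvPE x)) := by
  induction l generalizing e o with
  | nil => simp
  | cons x xs ih =>
    cases hp : pvPE x with
    | true =>
      have hc : (PySem.Int.mod ((PySem.Int.ofChars? [x]).getD 0) 2 == 0) = true := hp
      rw [List.foldl_cons, hc, if_pos rfl, ih, List.filter_cons, List.filter_cons]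
      simp [hp]
    | false =>
      have hc : (PySem.Int.mod ((PySem.Int.ofChars? [x]).getD 0) 2 == 0) = false := hp
      rw [List.foldl_cons, hc]
      simp only [Bool.false_eq_true, if_false, ih, List.filter_cons, hp]
      simp

theorem pv_foldStr (l : List Char) (a : List Char) :
    l.foldl (fun g x => g ++ [x]) a = a ++ l := by
  induction l generalizing a with
  | nil => simp
  | cons x xs ih => simp [ih]

theorem pv_foldJoin {α : Type} (l : List α) (f : α → List Char) (a : List (List Char)) :
    l.foldl (fun out ch => out ++ [f ch]) a = a ++ l.map f := by
  induction l generalizing a with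
  | nil => simp
  | cons x xs ih => simp [ih]

theorem pv_count_blocks (alph l : List Char) (h : alph.Nodup) (x : Char) :
    (pvBlocks alph l).count x = if x ∈ alph then l.count x else 0 := by
  induction alph with
  | nil => simp [pvBlocks]
  | cons c cs ih =>
    simp only [List.nodup_cons] at h
    simp only [pvBlocks, List.flatMap_cons, List.count_append, List.mem_cons]
    rw [show (cs.flatMap fun c => List.replicate (l.count c) c) = pvBlocks cs l from rfl,
      ih h.2]
    by_cases hx : x = c
    · subst hx
      simp [h.1]
    · simp [List.count_replicate, hx, Ne.symm hx]

theorem pv_perm_blocks (alph l : List Char) (hnd : alph.Nodup)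
    (hsub : ∀ x ∈ l, x ∈ alph) : (pvBlocks alph l).Perm l := by
  rw [List.perm_iff_count]
  intro x
  rw [pv_count_blocks alph l hnd x]
  by_cases hx : x ∈ alph
  · simp [hx]
  · have : x ∉ l := fun hl => hx (hsub x hl)
    simp [hx, List.count_eq_zero.2 this]

theorem pv_mem_blocks {alph l : List Char} {x : Char} (h : x ∈ pvBlocks alph l) :
    x ∈ alph := by
  simp only [pvBlocks, List.mem_flatMap] at h
  obtain ⟨c, hc, hr⟩ := h
  rw [List.eq_of_mem_replicate hr]
  exact hc

theorem pv_pairwise_blocks (alph l : List Char) (hp : alph.Pairwise (· < ·)) :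
    (pvBlocks alph l).Pairwise (· ≤ ·) := by
  induction alph with
  | nil => simp [pvBlocks]
  | cons c cs ih =>
    rw [List.pairwise_cons] at hp
    simp only [pvBlocks, List.flatMap_cons]
    rw [List.pairwise_append]
    refine ⟨List.pairwise_replicate.2 (Or.inr le_rfl), ih hp.2, ?_⟩
    intro x hx y hy
    rw [List.eq_of_mem_replicate hx]
    exact le_of_lt (hp.1 y (pv_mem_blocks hy))

theorem pv_sorted_eq_blocks (alph l : List Char) (hp : alph.Pairwise (· < ·))
    (hsub : ∀ x ∈ l, x ∈ alph) :
    PySem.List.sorted l (fun c => c) false = pvBlocks alph l :=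
  PySem.List.sorted_id_eq_of_perm_of_pairwise l (pvBlocks alph l)
    (pv_perm_blocks alph l hp.nodup hsub) (pv_pairwise_blocks alph l hp)

theorem pv_filter_blocks (p : Char → Bool) (alph l : List Char) :
    (pvBlocks alph l).filter p = pvBlocks (alph.filter p) l := by
  induction alph with
  | nil => simp [pvBlocks]
  | cons c cs ih =>
    simp only [pvBlocks, List.flatMap_cons, List.filter_append, List.filter_cons]
    by_cases h : p c = true
    · simp only [h, if_pos]
      rw [List.filter_replicate]
      simp only [h, if_pos, List.flatMap_cons]
      exact congrArg _ ih
    · simp only [h]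
      rw [List.filter_replicate]
      simp only [h, Bool.false_eq_true]
      simpa using ih

theorem pv_blocks_filter (p : Char → Bool) (alph l : List Char)
    (h : alph.all p = true) : pvBlocks alph (l.filter p) = pvBlocks alph l := by
  induction alph with
  | nil => rfl
  | cons c cs ih =>
    simp only [List.all_cons, Bool.and_eq_true] at h
    simp only [pvBlocks, List.flatMap_cons] at *
    rw [List.count_filter h.1, ih h.2]

theorem pv_dom_imp (p : Char → Bool) (h : (List.range 127).all (fun n => p (Char.ofNat n)) = true)
    (c : Char) (hc : pvDomChar c = true) : p c = true := by
  rw [List.all_eq_true] at h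
  have hle : c.toNat < 127 := by
    unfold pvDomChar at hc
    simp only [Bool.or_eq_true, Bool.and_eq_true, decide_eq_true_eq, beq_iff_eq] at hc
    omega
  have : Char.ofNat c.toNat = c := Char.ofNat_toNat c
  rw [← this]
  exact h c.toNat (List.mem_range.2 hle)

theorem pv_blocks_append (a b l : List Char) :
    pvBlocks (a ++ b) l = pvBlocks a l ++ pvBlocks b l := by
  simp [pvBlocks]

set_option maxRecDepth 4096 in
theorem pv_A_eq (S : String) (hdom : Dom_ginortS S) :
    ginortS S = String.mk (pvBlocks pvLOW S.toList ++ pvBlocks pvUPP S.toList ++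
      pvBlocks pvODD S.toList ++ pvBlocks pvEVE S.toList) := by
  have hchar : ∀ c ∈ S.toList, pvDomChar c = true := by
    simpa [Dom_ginortS, pvDomStr, List.all_eq_true] using hdom
  have hsubL : ∀ x ∈ S.toList.filter pvPL, x ∈ pvLOW := by
    intro x hx
    have hd := hchar x (List.mem_of_mem_filter hx)
    have hp := List.of_mem_filter hx
    have h2 := pv_dom_imp (fun c => !pvPL c || decide (c ∈ pvLOW)) (by decide) x hd
    simpa [hp] using h2
  have hsubU : ∀ x ∈ S.toList.filter pvPU, x ∈ pvUPP := by
    intro x hx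
    have hd := hchar x (List.mem_of_mem_filter hx)
    have hp := List.of_mem_filter hx
    have h2 := pv_dom_imp (fun c => !pvPU c || decide (c ∈ pvUPP)) (by decide) x hd
    simpa [hp] using h2
  have hsubD : ∀ x ∈ S.toList.filter pvPD, x ∈ pvDIG := by
    intro x hx
    have hd := hchar x (List.mem_of_mem_filter hx)
    have hp := List.of_mem_filter hx
    have h2 := pv_dom_imp (fun c => !pvPD c || decide (c ∈ pvDIG)) (by decide) x hd
    simpa [hp] using h2
  unfold ginortS
  rw [pv_foldA]
  simp only [List.nil_append]
  rw [pv_sorted_eq_blocks pvLOW _ (by decide) hsubL,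
      pv_sorted_eq_blocks pvUPP _ (by decide) hsubU,
      pv_sorted_eq_blocks pvDIG _ (by decide) hsubD,
      pv_blocks_filter pvPL pvLOW _ (by decide),
      pv_blocks_filter pvPU pvUPP _ (by decide),
      pv_blocks_filter pvPD pvDIG _ (by decide),
      pv_foldEO, pv_foldStr]
  simp only [List.nil_append]
  rw [pv_filter_blocks pvPE pvDIG, pv_filter_blocks (fun x => !pvPE x) pvDIG,
      show pvDIG.filter pvPE = pvEVE from by decide,
      show pvDIG.filter (fun x => !pvPE x) = pvODD from by decide]

theorem pv_B_eq (S : String) :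
    ginortS_alt S = String.mk (pvBlocks ginortOrder S.toList) := by
  unfold ginortS_alt
  simp only [PySem.Dict.foldl_insert_getD_add_one_eq_counter, pv_foldJoin, List.nil_append]
  congr 1
  rw [show (pvBlocks ginortOrder S.toList) =
      (ginortOrder.map (fun c => List.replicate (S.toList.count c) c)).flatten from by
    simp [pvBlocks, List.flatMap_def]]
  congr 1
  apply List.map_congr_left
  intro c _
  rw [PySem.Dict.getD_counter, PySem.List.pyRepeat_singleton]
  simp

-- ===== VERDICT (by name: the statement is the Claim_ definition above) =====
set_option maxRecDepth 4096 in
theorem ginortS_spec : Claim_equal_ginortS := by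
  intro S hdom
  unfold Spec_ginortS
  rw [pv_A_eq S hdom, pv_B_eq S,
      show ginortOrder = pvLOW ++ pvUPP ++ pvODD ++ pvEVE from by decide]
  simp [pv_blocks_append]
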